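-- pv_equiv track=rewrite | github.com/sieukim/algorithm-programmers | level2/ex51.py | solution
-- ===== SOURCE A (Python) =====
-- def solution(n):
--     n, mod = divmod(n, 2)
--
--     # 홀수 길이 -> 불가능
--     if mod == 1:
--         return 0
--
--     # dp[i] = dp[i-1] * 3 + dp[i-2] * 2 + dp[i-3] * 2 + ... dp[1] * 2 + 2
--     dp = [0 for _ in range(n + 1)]
--     dp[1] = 3
--
--     for i in range(2, n + 1):
--         dp[i] += dp[i-1] * 3
--         dp[i] += sum(dp[:i-1]) * 2
--         dp[i] += 2
--         dp[i] %= 1000000007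
--
--     return dp[n]
-- ===== SOURCE B (Python) =====
-- def solution(n):
--     half, r = divmod(n, 2)
--     if r == 1:
--         return 0
--     # dp[i] = (3*dp[i-1] + 2*sum(dp[:i-1]) + 2) % M; keep the running
--     # prefix sum instead of re-summing the whole dp list each step.
--     prev, pre = 3, 0  # prev = dp[i-1], pre = sum(dp[:i-1])
--     for _ in range(2, half + 1):
--         prev, pre = (3 * prev + 2 * pre + 2) % 1000000007, pre + prev
--     return prev
-- ===== Notes on version B (the rewrite author's own statement) =====
-- stated objective: alternative
-- what changed: Replaces the dp array with re-summed sum(dp[:i-1]) each step by a two-variable loop carrying the running prefix sum; Pre_ excludes even n <= 0, where A raises IndexError.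
-- outside the precondition, e.g. on solution(0): A raises IndexError, B returns 3
import Mathlib
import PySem

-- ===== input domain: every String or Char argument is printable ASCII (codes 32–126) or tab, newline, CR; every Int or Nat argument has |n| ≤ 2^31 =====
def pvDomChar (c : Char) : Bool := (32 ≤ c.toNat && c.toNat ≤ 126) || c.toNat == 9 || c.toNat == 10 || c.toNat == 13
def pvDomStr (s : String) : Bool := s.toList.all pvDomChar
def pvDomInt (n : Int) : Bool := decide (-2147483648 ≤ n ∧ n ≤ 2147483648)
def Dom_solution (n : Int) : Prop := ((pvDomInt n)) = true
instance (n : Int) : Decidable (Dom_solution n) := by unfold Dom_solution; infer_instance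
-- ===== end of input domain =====

-- B carries a running prefix sum of dp instead of re-summing dp[:i-1] each step.

-- ===== PORT A =====
def solution (n : Int) : Int :=
  let q := PySem.Int.floordiv n 2
  let m := PySem.Int.mod n 2
  if m == 1 then 0
  else
    let dp := (PySem.List.pyRange 0 (q + 1) 1).map (fun _ => (0 : Int))
    let dp := PySem.List.pySetD dp 1 3
    let dp := (PySem.List.pyRange 2 (q + 1) 1).foldl (fun dp i =>
      let dp := PySem.List.pySetD dp i (PySem.List.pyGetD dp i 0 + PySem.List.pyGetD dp (i - 1) 0 * 3)
      let dp := PySem.List.pySetD dp i (PySem.List.pyGetD dp i 0 + (PySem.List.slice dp none (some (i - 1))).sum * 2)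
      let dp := PySem.List.pySetD dp i (PySem.List.pyGetD dp i 0 + 2)
      PySem.List.pySetD dp i (PySem.Int.mod (PySem.List.pyGetD dp i 0) 1000000007)) dp
    PySem.List.pyGetD dp q 0

-- ===== PORT B =====
def solution_alt (n : Int) : Int :=
  let q := PySem.Int.floordiv n 2
  let r := PySem.Int.mod n 2
  if r == 1 then 0
  else
    ((PySem.List.pyRange 2 (q + 1) 1).foldl
      (fun (st : Int × Int) _ =>
        (PySem.Int.mod (3 * st.1 + 2 * st.2 + 2) 1000000007, st.2 + st.1))
      ((3 : Int), (0 : Int))).1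

-- ===== PRECONDITION & SPEC =====
-- Pre_ excludes exactly the even n ≤ 0, on which A raises IndexError (dp[1] = 3 on a list of length ≤ 1).
def Pre_solution (n : Int) : Prop := PySem.Int.mod n 2 = 1 ∨ 2 ≤ n
instance (n : Int) : Decidable (Pre_solution n) := by unfold Pre_solution; infer_instance
def pvWitness_solution : Int := 6

def Spec_solution (n : Int) (out : Int) : Prop := out = solution_alt n
instance (n : Int) (out : Int) : Decidable (Spec_solution n out) := by unfold Spec_solution; infer_instance

-- ===== CLAIM (what is proved, stated in full; the proofs are below) =====
def Claim_equal_solution : Prop := ∀ (n : Int), Dom_solution n → Pre_solution n → Spec_solution n (solution n)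

-- ===== LEMMAS AND PROOFS =====

-- B's loop state after k iterations: (dp[k+1], sum dp[:k+1]).
def stp (st : Int × Int) : Int × Int :=
  (PySem.Int.mod (3 * st.1 + 2 * st.2 + 2) 1000000007, st.2 + st.1)

def St (k : Nat) : Int × Int := stp^[k] (3, 0)

-- A's dp list after computing entries up to index k+1: [dp[0], …, dp[k+1]].
def G : Nat → List Int
  | 0 => [0, 3]
  | k + 1 => G k ++ [(St (k + 1)).1]

theorem length_G (k : Nat) : (G k).length = k + 2 := by
  induction k with
  | zero => rfl
  | succ j ih => simp [G, ih]

theorem getD_G_last (k : Nat) : (G k).getD (k + 1) 0 = (St k).1 := by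
  cases k with
  | zero => rfl
  | succ j =>
      have h := length_G j
      simp [G, List.getD, h]

theorem sum_G (k : Nat) : (G k).sum = (St (k + 1)).2 := by
  induction k with
  | zero => simp [G, St, stp]
  | succ j ih =>
      have h : St (j + 2) = stp (St (j + 1)) := Function.iterate_succ_apply' stp (j + 1) (3, 0)
      simp [G, ih, h, stp]

theorem sum_take_G (k : Nat) : ((G k).take (k + 1)).sum = (St k).2 := by
  cases k with
  | zero => rfl
  | succ j =>
      have h := length_G j
      have ht : (G (j + 1)).take (j + 2) = G j := by
        rw [G, List.take_append_of_le_length (by omega), List.take_of_length_le (by omega)]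
      rw [ht, sum_G]

-- B's fold ignores the range elements: it is an iterate of stp.
theorem foldl_const_iterate (l : List Int) (st : Int × Int) :
    l.foldl (fun s _ => stp s) st = stp^[l.length] st := by
  induction l generalizing st with
  | nil => rfl
  | cons x xs ih => simp [List.foldl, ih, Function.iterate_succ_apply]

-- one step of A's loop body on the invariant shape
theorem A_step (k Q : Nat) (hk : k < Q) :
    (fun (dp : List Int) (i : Int) =>
      let dp := PySem.List.pySetD dp i (PySem.List.pyGetD dp i 0 + PySem.List.pyGetD dp (i - 1) 0 * 3)
      let dp := PySem.List.pySetD dp i (PySem.List.pyGetD dp i 0 + (PySem.List.slice dp none (some (i - 1))).sum * 2)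
      let dp := PySem.List.pySetD dp i (PySem.List.pyGetD dp i 0 + 2)
      PySem.List.pySetD dp i (PySem.Int.mod (PySem.List.pyGetD dp i 0) 1000000007))
      (G k ++ List.replicate (Q - k) 0) ((k : Int) + 2)
    = G (k + 1) ++ List.replicate (Q - (k + 1)) 0 := by
  have hg := length_G k
  have hrep : List.replicate (Q - k) (0 : Int) = 0 :: List.replicate (Q - (k + 1)) 0 := by
    rw [show Q - k = (Q - (k + 1)) + 1 by omega, List.replicate_succ]
  beta_reduce
  have e2 : ((k : Int) + 2 - 1) = ((k + 1 : Nat) : Int) := by push_cast; ring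
  have e1 : ((k : Int) + 2) = ((k + 2 : Nat) : Int) := by push_cast; ring
  rw [e2, e1]
  simp only [PySem.List.pySetD_natCast, PySem.List.pyGetD_natCast, PySem.List.slice_to_natCast]
  rw [hrep, ← hg]
  have getD_len : ∀ (y : Int) (ys : List Int), (G k ++ y :: ys).getD (G k).length 0 = y := by
    intro y ys; simp [List.getD]
  have getD_k1 : ∀ (ys : List Int), (G k ++ ys).getD (k + 1) 0 = (St k).1 := by
    intro ys
    rw [show (G k ++ ys).getD (k + 1) 0 = (G k).getD (k + 1) 0 by
      simp [List.getD, List.getElem?_append_left (show k + 1 < (G k).length by omega)]]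
    exact getD_G_last k
  have set_len : ∀ (y v : Int) (ys : List Int),
      (G k ++ y :: ys).set (G k).length v = G k ++ v :: ys := by
    intro y v ys; simp
  have take_k1 : ∀ (ys : List Int), (G k ++ ys).take (k + 1) = (G k).take (k + 1) := by
    intro ys; exact List.take_append_of_le_length (by omega)
  simp only [set_len, getD_len, getD_k1, take_k1, sum_take_G]
  rw [show G (k + 1) = G k ++ [(St (k + 1)).1] from rfl, List.append_assoc]
  congr 2
  rw [show St (k + 1) = stp (St k) from Function.iterate_succ_apply' stp k (3, 0)]
  simp only [stp]
  congr 1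
  ring

-- the A loop invariant
theorem A_loop (Q k : Nat) (hk : k ≤ Q) :
    (PySem.List.pyRange 2 ((k : Int) + 2) 1).foldl
      (fun (dp : List Int) (i : Int) =>
        let dp := PySem.List.pySetD dp i (PySem.List.pyGetD dp i 0 + PySem.List.pyGetD dp (i - 1) 0 * 3)
        let dp := PySem.List.pySetD dp i (PySem.List.pyGetD dp i 0 + (PySem.List.slice dp none (some (i - 1))).sum * 2)
        let dp := PySem.List.pySetD dp i (PySem.List.pyGetD dp i 0 + 2)
        PySem.List.pySetD dp i (PySem.Int.mod (PySem.List.pyGetD dp i 0) 1000000007))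
      (G 0 ++ List.replicate Q 0)
    = G k ++ List.replicate (Q - k) 0 := by
  induction k with
  | zero => simp [PySem.List.pyRange_one_eq_nil]
  | succ j ih =>
      have hr : PySem.List.pyRange 2 ((j : Int) + 1 + 2) 1
          = PySem.List.pyRange 2 ((j : Int) + 2) 1 ++ [(j : Int) + 2] := by
        have := PySem.List.pyRange_one_succ_right (a := 2) (b := (j : Int) + 2) (by omega)
        simpa [add_assoc, add_comm, add_left_comm] using this
      rw [show ((j : Nat) + 1 : Nat) = j + 1 from rfl] at *
      rw [show (((j + 1 : Nat) : Int) + 2) = ((j : Int) + 1 + 2) by push_cast; ring, hr,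
        List.foldl_append, ih (by omega)]
      simpa using A_step j Q (by omega)

-- ===== VERDICT (by name: the statement is the Claim_ definition above) =====
theorem solution_spec : Claim_equal_solution := by
  intro n _ hpre
  unfold Spec_solution solution solution_alt
  by_cases hm : PySem.Int.mod n 2 = 1
  · simp only [hm]; norm_num
  · have hn : 2 ≤ n := hpre.resolve_left hm
    have hq1 : 1 ≤ PySem.Int.floordiv n 2 := by
      rw [PySem.Int.le_floordiv_iff_mul_le (by omega)]; omega
    obtain ⟨Q, hq⟩ : ∃ Q : Nat, PySem.Int.floordiv n 2 = (Q : Int) + 1 :=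
      ⟨(PySem.Int.floordiv n 2 - 1).toNat, by omega⟩
    simp only [hq]
    -- initial dp list = G 0 ++ replicate Q 0
    have hinit : PySem.List.pySetD
        ((PySem.List.pyRange 0 ((Q : Int) + 1 + 1) 1).map (fun _ => (0 : Int))) 1 3
        = G 0 ++ List.replicate Q 0 := by
      rw [List.map_const', PySem.List.length_pyRange_one,
        show (((Q : Int) + 1 + 1) - 0).toNat = Q + 2 by omega,
        PySem.List.pySetD_of_nonneg,
        List.replicate_succ, List.replicate_succ]
      · rfl
      · omega
    rw [hinit,
      show ((Q : Int) + 1 + 1) = ((Q : Int) + 2) by ring,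
      A_loop Q Q le_rfl, Nat.sub_self, List.replicate_zero, List.append_nil,
      show ((Q : Int) + 1) = ((Q + 1 : Nat) : Int) by push_cast; ring,
      PySem.List.pyGetD_natCast, getD_G_last,
      show (fun (st : Int × Int) (_ : Int) =>
        (PySem.Int.mod (3 * st.1 + 2 * st.2 + 2) 1000000007, st.2 + st.1))
        = (fun s _ => stp s) from rfl,
      foldl_const_iterate, PySem.List.length_pyRange_one,
      show (((Q : Int) + 2) - 2).toNat = Q by omega]
    rfl
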